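-- pv_equiv track=rewrite | github.com/afonsosgsramalho/aoc23 | day_7/day7.py | replacements
-- ===== SOURCE A (Python) =====
-- def replacements(hand):
--     if hand == '':
--         return ['']
--
--     # return [
--     #     x + y
--     #     for x in ("23456789TQKA" if hand[0] == "J" else hand[0])
--     #     for y in replacements(hand[1:])
--     # ]
--
--     result = []
--     if hand[0] == 'J':
--         for x in ('123456789TQKA'):
--             for y in replacements(hand[1:]):
--                 result.append(x + y)
--     else:
--         for y in replacements(hand[1:]):
--             result.append(hand[0] + y)
--
--     return result
-- ===== SOURCE B (Python) =====
-- def replacements(hand):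
--     # Iterative, back-to-front: the suffix's replacement list is built once and
--     # reused across all 13 wildcard choices, instead of being recomputed per choice.
--     res = ['']
--     for c in reversed(hand):
--         opts = '123456789TQKA' if c == 'J' else c
--         res = [x + y for x in opts for y in res]
--     return res
-- ===== Notes on version B (the rewrite author's own statement) =====
-- stated objective: faster
-- what changed: Replaces the recursion that recomputes replacements(hand[1:]) inside every iteration of the 13-way wildcard loop with a single back-to-front pass that builds the suffix's replacement list once and reuses it for all choices.
import Mathlib
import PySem

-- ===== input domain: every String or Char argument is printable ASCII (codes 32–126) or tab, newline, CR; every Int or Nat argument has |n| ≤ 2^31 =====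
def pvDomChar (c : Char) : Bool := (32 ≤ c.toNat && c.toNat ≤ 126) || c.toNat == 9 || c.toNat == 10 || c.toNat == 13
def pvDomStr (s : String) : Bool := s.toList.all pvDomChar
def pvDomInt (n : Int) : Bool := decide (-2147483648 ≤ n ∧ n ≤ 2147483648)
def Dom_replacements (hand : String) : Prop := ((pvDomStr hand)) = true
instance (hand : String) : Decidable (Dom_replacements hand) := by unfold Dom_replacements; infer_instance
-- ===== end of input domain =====

-- B builds the suffix's replacement list once per position (back-to-front fold) instead of
-- recomputing it inside each of the 13 wildcard iterations as A does: asymptotically faster.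

-- ===== PORT A =====
-- A, recursively on the list of characters; the double loop is two foldl's over an
-- append-accumulator, and replacements(hand[1:]) is recomputed per x-iteration as in A
-- (pure, so the repeated call denotes the same value).
def repA : List Char → List String
  | [] => [""]
  | c :: rest =>
    if c = 'J' then
      ("123456789TQKA".toList).foldl
        (fun result x =>
          (repA rest).foldl (fun result y => result ++ [String.mk (x :: y.toList)]) result) []
    else
      (repA rest).foldl (fun result y => result ++ [String.mk (c :: y.toList)]) []

def replacements (hand : String) : List String := repA hand.toList

-- ===== PORT B =====
-- B: one back-to-front pass (foldr = Python's `for c in reversed(hand)` updating res);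
-- the comprehension is a flatMap over the option characters times the previous res.
def repB (hand : List Char) : List String :=
  hand.foldr
    (fun c res =>
      (if c = 'J' then "123456789TQKA".toList else [c]).flatMap
        (fun x => res.map (fun y => String.mk (x :: y.toList)))) [""]

def replacements_alt (hand : String) : List String := repB hand.toList

-- ===== PRECONDITION & SPEC =====
def Spec_replacements (hand : String) (out : List String) : Prop := out = replacements_alt hand
instance (hand : String) (out : List String) : Decidable (Spec_replacements hand out) := by unfold Spec_replacements; infer_instance

-- ===== CLAIM (what is proved, stated in full; the proofs are below) =====
def Claim_equal_replacements : Prop := ∀ (hand : String), Dom_replacements hand → Spec_replacements hand (replacements hand)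

-- ===== LEMMAS AND PROOFS =====

-- ===== VERDICT (by name: the statement is the Claim_ definition above) =====
theorem repA_eq_repB (l : List Char) : repA l = repB l := by
  induction l with
  | nil => rfl
  | cons c rest ih =>
    have hB : repB (c :: rest) =
        (if c = 'J' then "123456789TQKA".toList else [c]).flatMap
          (fun x => (repB rest).map (fun y => String.mk (x :: y.toList))) := rfl
    rw [hB, ← ih, repA]
    split
    · simp only [PySem.List.foldl_append_singleton_eq_map]
      rw [PySem.List.foldl_append_eq_flatMap]
      simp
    · rw [PySem.List.foldl_append_singleton_eq_map]
      simp [List.flatMap_cons]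

theorem replacements_spec : Claim_equal_replacements := by
  intro hand _
  unfold Spec_replacements replacements replacements_alt
  exact repA_eq_repB _
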